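-- pv_equiv track=rewrite | github.com/holmes1313/Leetcode | array_and_string/stack/Cancellation problem/1598. Crawler Log Folder.py | minOperations1
-- ===== SOURCE A (Python) =====
-- def minOperations1(logs):
--     """
--     :type logs: List[str]
--     :rtype: int
--     """
--     is_main = True
--     depth = 0
--     for log in logs:
--         is_main = (depth == 0)
--         if log == "../":
--             if not is_main:
--                 depth -= 1
--         elif log != "./":
--             depth += 1
--
--     return abs(depth)
-- ===== SOURCE B (Python) =====
-- def minOperations1(logs):
--     """
--     :type logs: List[str]
--     :rtype: int
--     """
--     # Final value of a walk clamped at zero equals the maximum suffix sum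
--     # (including the empty suffix) of the unclamped +/-1 steps, so a single
--     # backward pass with no clamping suffices.
--     s = 0
--     best = 0
--     for log in reversed(logs):
--         if log == "../":
--             s -= 1
--         elif log != "./":
--             s += 1
--         best = max(best, s)
--     return best
-- ===== Notes on version B (the rewrite author's own statement) =====
-- stated objective: alternative
-- what changed: Instead of simulating the clamped-at-zero walk forward (counter with is_main flag and final abs), B scans the logs BACKWARD with no clamping at all, tracking the running suffix sum of +/-1 step values and returning its maximum with 0; the clamped walk's final depth equals max(0, max suffix sum).
import Mathlib
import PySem

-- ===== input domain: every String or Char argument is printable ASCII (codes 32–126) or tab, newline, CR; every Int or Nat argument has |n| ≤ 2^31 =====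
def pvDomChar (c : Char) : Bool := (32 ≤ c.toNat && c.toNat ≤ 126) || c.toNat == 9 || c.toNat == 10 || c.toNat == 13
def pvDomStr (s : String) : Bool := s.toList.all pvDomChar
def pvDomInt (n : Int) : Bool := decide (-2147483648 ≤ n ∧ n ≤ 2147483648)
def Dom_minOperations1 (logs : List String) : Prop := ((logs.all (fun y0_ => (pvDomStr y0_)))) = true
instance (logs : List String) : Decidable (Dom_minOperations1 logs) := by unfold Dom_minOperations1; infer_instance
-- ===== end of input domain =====

-- B replaces A's forward clamped-counter simulation by a backward pass with no clamping:
-- it returns the maximum (with 0) of the suffix sums of the +/-1 step values; same O(n) cost.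

-- ===== PORT A =====
-- one loop iteration of A: state is (is_main, depth)
def pvStepA (s : Bool × Int) (log : String) : Bool × Int :=
  let is_main := (s.2 == 0)
  if log == "../" then
    (is_main, if !is_main then s.2 - 1 else s.2)
  else if log != "./" then
    (is_main, s.2 + 1)
  else
    (is_main, s.2)

def minOperations1 (logs : List String) : Int :=
  let st := logs.foldl pvStepA (true, 0)
  |st.2|

-- ===== PORT B =====
-- one iteration of B's backward loop: state is (s, best)
def pvStepB (p : Int × Int) (log : String) : Int × Int :=
  let s :=
    if log == "../" then p.1 - 1
    else if log != "./" then p.1 + 1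
    else p.1
  (s, max p.2 s)

def minOperations1_alt (logs : List String) : Int :=
  (logs.reverse.foldl pvStepB (0, 0)).2

-- ===== PRECONDITION & SPEC =====
def Spec_minOperations1 (logs : List String) (out : Int) : Prop := out = minOperations1_alt logs
instance (logs : List String) (out : Int) : Decidable (Spec_minOperations1 logs out) := by unfold Spec_minOperations1; infer_instance

-- ===== CLAIM =====
def Claim_equal_minOperations1 : Prop := ∀ (logs : List String), Dom_minOperations1 logs → Spec_minOperations1 logs (minOperations1 logs)

-- ===== LEMMAS AND PROOFS =====

-- proof-side helpers: the step value, the total sum, and the max suffix sum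
def pvVal (log : String) : Int :=
  if log == "../" then -1 else if log != "./" then 1 else 0

def pvT : List String → Int
  | [] => 0
  | a :: t => pvVal a + pvT t

def pvS : List String → Int
  | [] => 0
  | a :: t => max (pvS t) (pvVal a + pvT t)

theorem pvS_nonneg (l : List String) : 0 ≤ pvS l := by
  induction l with
  | nil => simp [pvS]
  | cons a t ih => simp [pvS]; left; exact ih

theorem pvT_le_pvS (l : List String) : pvT l ≤ pvS l := by
  cases l with
  | nil => simp [pvT, pvS]
  | cons a t => simp [pvT, pvS]

-- B's backward fold computes (total sum, max suffix sum)
theorem b_fold (l : List String) :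
    l.reverse.foldl pvStepB (0, 0) = (pvT l, pvS l) := by
  induction l with
  | nil => simp [pvT, pvS]
  | cons a t ih =>
    rw [List.reverse_cons, List.foldl_append, ih]
    simp only [List.foldl_cons, List.foldl_nil]
    have h1 : pvStepB (pvT t, pvS t) a
        = (pvT t + pvVal a, max (pvS t) (pvT t + pvVal a)) := by
      refine Prod.ext ?_ ?_ <;>
        (simp only [pvStepB, pvVal]
         by_cases hu : a = "../" <;> by_cases hc : a = "./" <;>
           simp [hu, hc] <;> omega)
    rw [h1]
    refine Prod.ext ?_ ?_ <;> simp only [pvT, pvS] <;> omega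

-- A's forward clamped fold, from a nonnegative start d, ends at max (pvS l) (d + pvT l)
theorem a_fold (l : List String) : ∀ (b : Bool) (d : Int), 0 ≤ d →
    (l.foldl pvStepA (b, d)).2 = max (pvS l) (d + pvT l) := by
  induction l with
  | nil =>
    intro b d hd
    simp [pvS, pvT]
    omega
  | cons a t ih =>
    intro b d hd
    have hTS := pvT_le_pvS t
    simp only [List.foldl_cons]
    by_cases h1 : a = "../"
    · have hv : pvVal a = -1 := by simp [pvVal, h1]
      by_cases h : d = 0
      · have hstep : pvStepA (b, d) a = (true, d) := by
          simp [pvStepA, h1, h]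
        rw [hstep, ih _ d hd]
        simp only [pvS, pvT, hv]
        omega
      · have hstep : pvStepA (b, d) a = (false, d - 1) := by
          simp [pvStepA, h1, h]
        rw [hstep, ih _ (d - 1) (by omega)]
        simp only [pvS, pvT, hv]
        omega
    · by_cases h2 : a = "./"
      · have hv : pvVal a = 0 := by simp [pvVal, h2]
        have hstep : pvStepA (b, d) a = ((d == 0), d) := by simp [pvStepA, h2]
        rw [hstep, ih _ d hd]
        simp only [pvS, pvT, hv]
        omega
      · have hv : pvVal a = 1 := by simp [pvVal, h1, h2]
        have hstep : pvStepA (b, d) a = ((d == 0), d + 1) := by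
          simp [pvStepA, h1, h2]
        rw [hstep, ih _ (d + 1) (by omega)]
        simp only [pvS, pvT, hv]
        omega

-- ===== VERDICT =====
theorem minOperations1_spec : Claim_equal_minOperations1 := by
  intro logs _
  unfold Spec_minOperations1 minOperations1 minOperations1_alt
  rw [b_fold]
  have h := a_fold logs true 0 le_rfl
  simp only [zero_add] at h
  simp only [h]
  have h1 := pvT_le_pvS logs
  have h2 := pvS_nonneg logs
  rw [max_eq_left h1]
  exact abs_of_nonneg h2
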